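-- pv_equiv track=rewrite | github.com/JinMinji/Algorithm_questions | Python/BaekJoon/question2448_3.py | merge_triangle
-- ===== SOURCE A (Python) =====
-- def merge_triangle(star_arr):
--     result_arr = [[' ' for i in range(len(star_arr[0])*2)] for j in range(len(star_arr)*2)]
--
--     H = len(star_arr)
--     W = len(star_arr[0])
--
--     # 3번 복사해야함.
--     # 맨 위 삼각형
--     for i in range(len(star_arr)):
--         for j in range(len(star_arr[0])):
--             # 3번 복사해야함.
--             # 맨 위 삼각형
--             result_arr[i][W//2+j] = star_arr[i][j]
--             # 왼쪽 아래 삼각형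
--             result_arr[H + i][j] = star_arr[i][j]
--             # 오른쪽 아래 삼각형
--             result_arr[H + i][W + j] = star_arr[i][j]
--
--     return result_arr
-- ===== SOURCE B (Python) =====
-- def merge_triangle(star_arr):
--     H = len(star_arr)
--     W = len(star_arr[0])
--
--     def cell(r, c):
--         if r < H:
--             return star_arr[r][c - W // 2] if W // 2 <= c < W // 2 + W else ' '
--         return star_arr[r - H][c % W]
--
--     return [[cell(r, c) for c in range(2 * W)] for r in range(2 * H)]
-- ===== Notes on version B (the rewrite author's own statement) =====
-- stated objective: alternative
-- what changed: B is a gather: it iterates over the OUTPUT coordinates (r,c) and computes each cell from a closed-form coordinate mapping into the input, instead of A's scatter that iterates over the input (i,j) and writes each input cell into three destinations of a preallocated space grid.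
import Mathlib
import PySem

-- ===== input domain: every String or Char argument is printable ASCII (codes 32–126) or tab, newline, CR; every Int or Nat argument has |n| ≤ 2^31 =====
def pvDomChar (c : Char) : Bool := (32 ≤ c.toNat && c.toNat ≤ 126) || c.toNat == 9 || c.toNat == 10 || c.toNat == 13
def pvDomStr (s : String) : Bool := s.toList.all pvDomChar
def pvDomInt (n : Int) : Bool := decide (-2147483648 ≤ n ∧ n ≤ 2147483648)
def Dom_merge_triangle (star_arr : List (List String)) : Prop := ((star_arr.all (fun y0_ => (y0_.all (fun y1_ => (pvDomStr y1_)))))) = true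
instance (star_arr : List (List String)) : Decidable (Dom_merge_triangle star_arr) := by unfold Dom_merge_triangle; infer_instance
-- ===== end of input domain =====

-- B is a gather over the OUTPUT grid: each cell (r,c) is computed from a closed-form coordinate
-- mapping into the input, instead of A's scatter of every input cell into three destinations.

-- ===== PORT A =====
-- result_arr[i][k] = v  (Python assignment; index valid on Pre_, where this is exact)
def pvSet2 (res : List (List String)) (i k : Nat) (v : String) : List (List String) :=
  res.modify i (fun row => row.set k v)

-- star_arr[i][j] is ported as getD with defaults; on Pre_ the indices are in range, so this is exact
-- (outside Pre_ the Python raises IndexError).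
def merge_triangle (star_arr : List (List String)) : List (List String) :=
  let H := star_arr.length
  let W := (star_arr.headD []).length
  let result0 := List.replicate (H*2) (List.replicate (W*2) " ")
  (List.range H).foldl (fun res i =>
    (List.range W).foldl (fun res j =>
      let c := (star_arr.getD i []).getD j " "
      pvSet2 (pvSet2 (pvSet2 res i (W/2 + j) c) (H + i) j c) (H + i) (W + j) c) res) result0

-- ===== PORT B =====
-- B's cell(r, c): closed-form value of output cell (r,c); getD is exact on Pre_ (indices in range)
def pvCell (s : List (List String)) (H W : Nat) (r c : Nat) : String :=
  if r < H then
    if W/2 ≤ c ∧ c < W/2 + W then (s.getD r []).getD (c - W/2) " " else " "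
  else (s.getD (r - H) []).getD (c % W) " "

def merge_triangle_alt (star_arr : List (List String)) : List (List String) :=
  let H := star_arr.length
  let W := (star_arr.headD []).length
  (List.range (2*H)).map (fun r => (List.range (2*W)).map (fun c => pvCell star_arr H W r c))

-- ===== PRECONDITION & SPEC =====
-- Pre_ excludes exactly the inputs where Python A raises IndexError: the empty list
-- (star_arr[0]) and ragged inputs with some row shorter than the first row (star_arr[i][j]).
def Pre_merge_triangle (star_arr : List (List String)) : Prop :=
  star_arr ≠ [] ∧ ∀ row ∈ star_arr, (star_arr.headD []).length ≤ row.length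
instance (star_arr : List (List String)) : Decidable (Pre_merge_triangle star_arr) := by
  unfold Pre_merge_triangle; infer_instance
def pvWitness_merge_triangle : List (List String) := [[" ", "*"], ["*", "*"]]
def Spec_merge_triangle (star_arr : List (List String)) (out : List (List String)) : Prop := out = merge_triangle_alt star_arr
instance (star_arr : List (List String)) (out : List (List String)) : Decidable (Spec_merge_triangle star_arr out) := by unfold Spec_merge_triangle; infer_instance

-- ===== CLAIM (what is proved, stated in full; the proofs are below) =====
def Claim_equal_merge_triangle : Prop := ∀ (star_arr : List (List String)), Dom_merge_triangle star_arr → Pre_merge_triangle star_arr → Spec_merge_triangle star_arr (merge_triangle star_arr)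

-- ===== LEMMAS AND PROOFS =====

-- [row[j] for j in range(W)] — the common row form both ports are reduced to
def pvRowSlice (W : Nat) (row : List String) : List String :=
  (List.range W).map (fun j => row.getD j " ")

-- the common normal form: top rows then bottom rows, as maps over s
def pvRows (s : List (List String)) : List (List String) :=
  let W := (s.headD []).length
  s.map (fun row =>
      List.replicate (W/2) " " ++ pvRowSlice W row ++ List.replicate (W - W/2) " ")
  ++ s.map (fun row => pvRowSlice W row ++ pvRowSlice W row)

-- a function commuting with every step commutes with the whole fold
theorem pv_foldl_comm_through {α β : Type} (g : β → α → α) (h : α → α) (js : List β)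
    (hc : ∀ j ∈ js, ∀ x, g j (h x) = h (g j x)) (x : α) :
    js.foldl (fun r j => g j r) (h x) = h (js.foldl (fun r j => g j r) x) := by
  induction js generalizing x with
  | nil => simp
  | cons j js ih =>
    simp only [List.foldl_cons]
    rw [hc j (by simp) x, ih (fun j' hj' => hc j' (by simp [hj']))]

-- a fold of two pointwise-commuting updates splits into two folds
theorem pv_foldl_comp_split {α β : Type} (g1 g2 : β → α → α) (js : List β)
    (hcomm : ∀ j ∈ js, ∀ j' ∈ js, ∀ x, g1 j (g2 j' x) = g2 j' (g1 j x)) (r : α) :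
    js.foldl (fun r j => g2 j (g1 j r)) r
      = js.foldl (fun r j => g2 j r) (js.foldl (fun r j => g1 j r) r) := by
  induction js generalizing r with
  | nil => rfl
  | cons j js ih =>
    simp only [List.foldl_cons]
    rw [ih (fun a ha b hb => hcomm a (by simp [ha]) b (by simp [hb])),
      pv_foldl_comm_through g1 (g2 j) js
        (fun j' hj' x => (hcomm j' (by simp [hj']) j (by simp) x)) (g1 j r)]

theorem pv_modify_id {α : Type} : ∀ (i : Nat) (l : List α), l.modify i (fun x => x) = l
  | 0, [] => rfl
  | 0, _ :: _ => rfl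
  | _+1, [] => rfl
  | i+1, a :: t => congrArg (a :: ·) (pv_modify_id i t)

-- repeated modify at one fixed index is one modify by the folded row function
theorem pv_foldl_modify {α β : Type} (i : Nat) (u : β → α → α) (js : List β) (r : List α) :
    js.foldl (fun r j => r.modify i (u j)) r
      = r.modify i (fun row => js.foldl (fun row j => u j row) row) := by
  induction js generalizing r with
  | nil => exact (pv_modify_id i r).symm
  | cons j js ih =>
    simp only [List.foldl_cons]
    rw [ih, List.modify_modify_eq]
    rfl

theorem pv_modify_comm {α : Type} (i k : Nat) (h : i ≠ k) (f g : α → α) (l : List α) :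
    (l.modify i f).modify k g = (l.modify k g).modify i f := by
  induction l generalizing i k with
  | nil => simp
  | cons a t ih =>
    cases i with
    | zero => cases k with
      | zero => omega
      | succ k => simp
    | succ i => cases k with
      | zero => simp
      | succ k => simp [ih i k (by omega)]

theorem pv_modify_append_middle {α : Type} (l1 : List α) (a : α) (l2 : List α) (f : α → α) :
    (l1 ++ a :: l2).modify l1.length f = l1 ++ f a :: l2 := by
  induction l1 with
  | nil => simp
  | cons b t ih => simp [ih]

-- writing a contiguous block with set
theorem pv_setBlock {α : Type} (f : Nat → α) (off n : Nat) (base : List α)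
    (h : off + n ≤ base.length) :
    (List.range n).foldl (fun r j => r.set (off + j) (f j)) base
      = base.take off ++ (List.range n).map f ++ base.drop (off + n) := by
  induction n with
  | zero => simp
  | succ n ih =>
    rw [List.range_succ, List.foldl_append, ih (by omega)]
    have hlen : (base.take off ++ (List.range n).map f).length = off + n := by
      simp [List.length_take]; omega
    have hdrop : base.drop (off + n) = base[off + n]'(by omega) :: base.drop (off + n + 1) :=
      (List.getElem_cons_drop (by omega)).symm
    simp only [List.foldl_cons, List.foldl_nil, List.append_assoc]
    rw [← List.append_assoc, List.set_append_right _ _ (by omega), hlen, hdrop]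
    simp [Nat.add_assoc]

theorem pv_setBlock0 {α : Type} (f : Nat → α) (n : Nat) (base : List α) (h : n ≤ base.length) :
    (List.range n).foldl (fun r j => r.set j (f j)) base
      = (List.range n).map f ++ base.drop n := by
  have := pv_setBlock f 0 n base (by omega)
  simpa using this

-- modifying a block of identical rows in place
theorem pv_modifyBlock {α : Type} (V : Nat → α → α) (n : Nat) (base : α) (l1 l2 : List α) :
    (List.range n).foldl (fun r i => r.modify (l1.length + i) (V i))
        (l1 ++ List.replicate n base ++ l2)
      = l1 ++ (List.range n).map (fun i => V i base) ++ l2 := by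
  induction n generalizing l2 with
  | zero => simp
  | succ n ih =>
    rw [List.range_succ, List.foldl_append]
    have hrep : l1 ++ List.replicate (n+1) base ++ l2
        = l1 ++ List.replicate n base ++ (base :: l2) := by
      simp [List.replicate_succ']
    rw [hrep, ih (base :: l2)]
    have hlen : l1.length + n = (l1 ++ (List.range n).map (fun i => V i base)).length := by
      simp
    simp only [List.foldl_cons, List.foldl_nil, List.append_assoc]
    rw [← List.append_assoc, hlen, pv_modify_append_middle]
    simp

theorem pv_map_range_getD {α β : Type} (d : α) (f : α → β) (l : List α) :
    (List.range l.length).map (fun i => f (l.getD i d)) = l.map f := by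
  induction l with
  | nil => simp
  | cons a t ih =>
    rw [List.length_cons, List.range_succ_eq_map, List.map_cons, List.map_map]
    simpa using ih

-- fold of two modifies at distinct fixed indices = two single modifies
theorem pv_foldl_modify2 {α : Type} (i k : Nat) (h : i ≠ k) (u v : Nat → α → α)
    (js : List Nat) (r : List α) :
    js.foldl (fun r j => (r.modify i (u j)).modify k (v j)) r
      = (r.modify i (fun row => js.foldl (fun row j => u j row) row)).modify k
          (fun row => js.foldl (fun row j => v j row) row) := by
  have hsplit := pv_foldl_comp_split (fun j (r : List α) => r.modify i (u j))
    (fun j (r : List α) => r.modify k (v j)) js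
    (fun _ _ _ _ x => pv_modify_comm k i (fun hh => h hh.symm) _ _ x) r
  simp only [] at hsplit
  rw [hsplit, pv_foldl_modify, pv_foldl_modify]

-- inner j-loop of A = one top-row modify and one bottom-row modify
theorem pv_inner_eq (s : List (List String)) (W H i : Nat) (hi : i < H)
    (res : List (List String)) :
    (List.range W).foldl (fun res j =>
        pvSet2 (pvSet2 (pvSet2 res i (W/2 + j) ((s.getD i []).getD j " "))
          (H + i) j ((s.getD i []).getD j " ")) (H + i) (W + j) ((s.getD i []).getD j " ")) res
      = (res.modify i (fun row =>
            (List.range W).foldl (fun row j => row.set (W/2 + j) ((s.getD i []).getD j " ")) row)).modify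
          (H + i) (fun row =>
            (List.range W).foldl (fun row j =>
              (row.set j ((s.getD i []).getD j " ")).set (W + j) ((s.getD i []).getD j " ")) row) := by
  have hb : (fun (res : List (List String)) (j : Nat) =>
        pvSet2 (pvSet2 (pvSet2 res i (W/2 + j) ((s.getD i []).getD j " "))
          (H + i) j ((s.getD i []).getD j " ")) (H + i) (W + j) ((s.getD i []).getD j " "))
      = fun res j => ((res.modify i (fun row => row.set (W/2 + j) ((s.getD i []).getD j " ")))).modify
          (H + i) (fun row => (row.set j ((s.getD i []).getD j " ")).set (W + j) ((s.getD i []).getD j " ")) := by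
    funext res j
    simp only [pvSet2, List.modify_modify_eq]
    rfl
  rw [hb, pv_foldl_modify2 i (H + i) (by omega)]

-- the top-row write pattern applied to a blank row
theorem pvU_row (s : List (List String)) (W i : Nat) :
    (List.range W).foldl (fun row j => row.set (W/2 + j) ((s.getD i []).getD j " "))
        (List.replicate (W*2) " ")
      = List.replicate (W/2) " " ++ pvRowSlice W (s.getD i [])
          ++ List.replicate (W - W/2) " " := by
  rw [pv_setBlock (fun j => (s.getD i []).getD j " ") (W/2) W _
    (by simp [List.length_replicate]; omega)]
  have h1 : min (W/2) (W*2) = W/2 := by omega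
  have h2 : W*2 - (W/2 + W) = W - W/2 := by omega
  simp [List.take_replicate, List.drop_replicate, h1, h2, pvRowSlice]

-- the bottom-row write pattern applied to a blank row
theorem pvV_row (s : List (List String)) (W i : Nat) :
    (List.range W).foldl (fun row j =>
        (row.set j ((s.getD i []).getD j " ")).set (W + j) ((s.getD i []).getD j " "))
        (List.replicate (W*2) " ")
      = pvRowSlice W (s.getD i []) ++ pvRowSlice W (s.getD i []) := by
  have hsplit := pv_foldl_comp_split
    (fun j (row : List String) => row.set j ((s.getD i []).getD j " "))
    (fun j (row : List String) => row.set (W + j) ((s.getD i []).getD j " "))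
    (List.range W)
    (fun j hj _ _ x => List.set_comm _ _
      (show W + _ ≠ j by have := List.mem_range.mp hj; omega))
    (List.replicate (W*2) " ")
  simp only [] at hsplit
  rw [hsplit, pv_setBlock0 _ W _ (by simp; omega), List.drop_replicate]
  rw [pv_setBlock (fun j => (s.getD i []).getD j " ") W W _ (by simp; omega)]
  have htake : ((List.range W).map (fun j => (s.getD i []).getD j " ")
      ++ List.replicate (W*2 - W) " ").take W
      = (List.range W).map (fun j => (s.getD i []).getD j " ") := by
    rw [List.take_append_of_le_length (by simp)]
    simp
  have hdrop : ((List.range W).map (fun j => (s.getD i []).getD j " ")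
      ++ List.replicate (W*2 - W) " ").drop (W + W) = [] := by
    apply List.drop_eq_nil_of_le
    simp; omega
  rw [htake, hdrop]
  simp [pvRowSlice]

-- A reduces to the common row form
theorem merge_triangle_eq_rows (s : List (List String)) :
    merge_triangle s = pvRows s := by
  simp only [merge_triangle, pvRows]
  rw [PySem.List.foldl_congr_mem _ _ _ _
    (fun res i hi => pv_inner_eq s (s.headD []).length s.length i (List.mem_range.mp hi) res)]
  have hsplit := pv_foldl_comp_split
    (fun i (res : List (List String)) => res.modify i (fun row =>
      (List.range (s.headD []).length).foldl (fun row j =>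
        row.set ((s.headD []).length/2 + j) ((s.getD i []).getD j " ")) row))
    (fun i (res : List (List String)) => res.modify (s.length + i) (fun row =>
      (List.range (s.headD []).length).foldl (fun row j =>
        (row.set j ((s.getD i []).getD j " ")).set ((s.headD []).length + j)
          ((s.getD i []).getD j " ")) row))
    (List.range s.length)
    (fun a ha b _ x => pv_modify_comm (s.length + b) a
      (by have := List.mem_range.mp ha; omega) _ _ x)
    (List.replicate (s.length*2) (List.replicate ((s.headD []).length*2) " "))
  simp only [] at hsplit
  rw [hsplit]
  have h2H : s.length * 2 = s.length + s.length := by omega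
  have h1 := pv_modifyBlock (fun i (row : List String) =>
      (List.range (s.headD []).length).foldl (fun row j =>
        row.set ((s.headD []).length/2 + j) ((s.getD i []).getD j " ")) row)
    s.length (List.replicate ((s.headD []).length*2) " ") []
    (List.replicate s.length (List.replicate ((s.headD []).length*2) " "))
  simp only [List.nil_append, List.length_nil, Nat.zero_add] at h1
  rw [h2H, List.replicate_add, h1]
  have h2 := pv_modifyBlock (fun i (row : List String) =>
      (List.range (s.headD []).length).foldl (fun row j =>
        (row.set j ((s.getD i []).getD j " ")).set ((s.headD []).length + j)
          ((s.getD i []).getD j " ")) row)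
    s.length (List.replicate ((s.headD []).length*2) " ")
    ((List.range s.length).map (fun i =>
      (List.range (s.headD []).length).foldl (fun row j =>
        row.set ((s.headD []).length/2 + j) ((s.getD i []).getD j " "))
        (List.replicate ((s.headD []).length*2) " "))) []
  simp only [List.length_map, List.length_range, List.append_nil] at h2
  rw [h2]
  have htop : (List.range s.length).map (fun i =>
      (List.range (s.headD []).length).foldl (fun row j =>
        row.set ((s.headD []).length/2 + j) ((s.getD i []).getD j " "))
        (List.replicate ((s.headD []).length*2) " "))
      = s.map (fun row => List.replicate ((s.headD []).length/2) " "
          ++ pvRowSlice (s.headD []).length row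
          ++ List.replicate ((s.headD []).length - (s.headD []).length/2) " ") := by
    rw [show (fun i => (List.range (s.headD []).length).foldl (fun row j =>
        row.set ((s.headD []).length/2 + j) ((s.getD i []).getD j " "))
        (List.replicate ((s.headD []).length*2) " "))
      = (fun i => (fun row => List.replicate ((s.headD []).length/2) " "
          ++ pvRowSlice (s.headD []).length row
          ++ List.replicate ((s.headD []).length - (s.headD []).length/2) " ") (s.getD i []))
      from funext (fun i => pvU_row s (s.headD []).length i)]
    exact pv_map_range_getD [] (fun row => List.replicate ((s.headD []).length/2) " "
      ++ pvRowSlice (s.headD []).length row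
      ++ List.replicate ((s.headD []).length - (s.headD []).length/2) " ") s
  have hbot : (List.range s.length).map (fun i =>
      (List.range (s.headD []).length).foldl (fun row j =>
        (row.set j ((s.getD i []).getD j " ")).set ((s.headD []).length + j)
          ((s.getD i []).getD j " "))
        (List.replicate ((s.headD []).length*2) " "))
      = s.map (fun row => pvRowSlice (s.headD []).length row
          ++ pvRowSlice (s.headD []).length row) := by
    rw [show (fun i => (List.range (s.headD []).length).foldl (fun row j =>
        (row.set j ((s.getD i []).getD j " ")).set ((s.headD []).length + j)
          ((s.getD i []).getD j " "))
        (List.replicate ((s.headD []).length*2) " "))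
      = (fun i => (fun row => pvRowSlice (s.headD []).length row
          ++ pvRowSlice (s.headD []).length row) (s.getD i []))
      from funext (fun i => pvV_row s (s.headD []).length i)]
    exact pv_map_range_getD [] (fun row => pvRowSlice (s.headD []).length row
      ++ pvRowSlice (s.headD []).length row) s
  rw [htop, hbot]

-- B's top row (r < H) is the padded row slice
theorem pvCell_top_row (s : List (List String)) (H W r : Nat) (hr : r < H) :
    (List.range (2*W)).map (fun c => pvCell s H W r c)
      = List.replicate (W/2) " " ++ pvRowSlice W (s.getD r [])
          ++ List.replicate (W - W/2) " " := by
  have h2W : 2*W = W/2 + (W + (W - W/2)) := by omega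
  rw [h2W]
  simp only [List.range_add, List.map_append, List.map_map]
  rw [List.append_assoc]
  congr 1
  · rw [List.eq_replicate_iff]
    refine ⟨by simp, ?_⟩
    intro x hx
    obtain ⟨c, hc, rfl⟩ := List.mem_map.mp hx
    have := List.mem_range.mp hc
    simp only [pvCell, if_pos hr]
    rw [if_neg (by omega)]
  congr 1
  · simp only [pvRowSlice]
    apply List.map_congr_left
    intro j hj
    have hjW := List.mem_range.mp hj
    simp only [Function.comp_apply, pvCell, if_pos hr]
    rw [if_pos (by omega)]
    have : W/2 + j - W/2 = j := by omega
    rw [this]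
  · rw [List.eq_replicate_iff]
    refine ⟨by simp, ?_⟩
    intro x hx
    obtain ⟨c, hc, rfl⟩ := List.mem_map.mp hx
    have := List.mem_range.mp hc
    simp only [Function.comp_apply, pvCell, if_pos hr]
    rw [if_neg (by omega)]

-- B's bottom row (r = H + i) is the doubled row slice
theorem pvCell_bot_row (s : List (List String)) (H W i : Nat) :
    (List.range (2*W)).map (fun c => pvCell s H W (H + i) c)
      = pvRowSlice W (s.getD i []) ++ pvRowSlice W (s.getD i []) := by
  have h2W : 2*W = W + W := by omega
  rw [h2W]
  simp only [List.range_add, List.map_append, List.map_map]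
  congr 1
  · simp only [pvRowSlice]
    apply List.map_congr_left
    intro j hj
    have hjW := List.mem_range.mp hj
    simp only [pvCell]
    rw [if_neg (by omega)]
    have h1 : H + i - H = i := by omega
    have h2 : j % W = j := Nat.mod_eq_of_lt hjW
    rw [h1, h2]
  · simp only [pvRowSlice]
    apply List.map_congr_left
    intro j hj
    have hjW := List.mem_range.mp hj
    simp only [Function.comp_apply, pvCell]
    rw [if_neg (by omega)]
    have h1 : H + i - H = i := by omega
    have h2 : (W + j) % W = j := by rw [Nat.add_mod_left]; exact Nat.mod_eq_of_lt hjW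
    rw [h1, h2]

-- B reduces to the common row form
theorem merge_triangle_alt_eq_rows (s : List (List String)) :
    merge_triangle_alt s = pvRows s := by
  simp only [merge_triangle_alt, pvRows]
  have h2H : 2*s.length = s.length + s.length := by omega
  rw [h2H, List.range_add, List.map_append, List.map_map]
  congr 1
  · rw [List.map_congr_left (fun r hr => pvCell_top_row s s.length (s.headD []).length r
      (List.mem_range.mp hr))]
    exact pv_map_range_getD [] (fun row => List.replicate ((s.headD []).length/2) " "
      ++ pvRowSlice (s.headD []).length row
      ++ List.replicate ((s.headD []).length - (s.headD []).length/2) " ") s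
  · rw [show ((fun r => (List.range (2*(s.headD []).length)).map
        (fun c => pvCell s s.length (s.headD []).length r c)) ∘ (fun i => s.length + i))
      = (fun i => pvRowSlice (s.headD []).length (s.getD i [])
          ++ pvRowSlice (s.headD []).length (s.getD i []))
      from funext (fun i => pvCell_bot_row s s.length (s.headD []).length i)]
    exact pv_map_range_getD [] (fun row => pvRowSlice (s.headD []).length row
      ++ pvRowSlice (s.headD []).length row) s

-- ===== VERDICT (by name: the statement is the Claim_ definition above) =====
theorem merge_triangle_spec : Claim_equal_merge_triangle := by
  intro s _ _
  unfold Spec_merge_triangle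
  rw [merge_triangle_eq_rows, merge_triangle_alt_eq_rows]
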